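-- pv_equiv track=rewrite | github.com/fabianfransen/B8azure6 | Opzet_Pubmed_Search.py | datum_maken
-- ===== SOURCE A (Python) =====
-- def datum_maken(datum_):
--     datum_nieuw = ""
--     count = 0
--     string = ""
--     for cijfer in datum_:
--         string = string + cijfer
--         count += 1
--         if count == 4:
--             datum_nieuw = datum_nieuw + string
--             string = ""
--         if count == 6:
--             datum_nieuw = datum_nieuw + " " + string
--             string = ""
--         if count == 8:
--             datum_nieuw = datum_nieuw + " " + string
--
--     return datum_nieuw
-- ===== SOURCE B (Python) =====
-- def datum_maken(datum_):
--     n = len(datum_)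
--     result = datum_[0:4] if n >= 4 else ""
--     if n >= 6:
--         result += " " + datum_[4:6]
--     if n >= 8:
--         result += " " + datum_[6:8]
--     return result
-- ===== Notes on version B (the rewrite author's own statement) =====
-- stated objective: faster
-- what changed: Replaces the counter-driven char-by-char accumulation loop with three direct length-gated slices (s[0:4], s[4:6], s[6:8]) joined by spaces, so only the first 8 characters are ever touched.
import Mathlib
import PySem

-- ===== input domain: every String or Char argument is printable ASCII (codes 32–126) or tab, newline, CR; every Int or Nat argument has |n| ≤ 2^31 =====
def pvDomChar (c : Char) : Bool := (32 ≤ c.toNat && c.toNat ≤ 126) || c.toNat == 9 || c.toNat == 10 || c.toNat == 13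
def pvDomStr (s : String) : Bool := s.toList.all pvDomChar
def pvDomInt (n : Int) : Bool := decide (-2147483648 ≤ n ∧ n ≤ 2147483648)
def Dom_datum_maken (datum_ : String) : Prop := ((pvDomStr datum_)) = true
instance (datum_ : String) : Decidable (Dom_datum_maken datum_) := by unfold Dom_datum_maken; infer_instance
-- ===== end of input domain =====

-- B replaces A's counter-driven accumulation loop by three length-gated slices; objective: simpler.

-- ===== PORT A =====
-- Python strings are modeled as List Char (exact for concatenation of single chars);
-- the loop state is (datum_nieuw, count, string).
def datumStepA (st : List Char × Nat × List Char) (cijfer : Char) : List Char × Nat × List Char :=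
  let string := st.2.2 ++ [cijfer]
  let count := st.2.1 + 1
  let nieuw := st.1
  let p1 := if count = 4 then (nieuw ++ string, ([] : List Char)) else (nieuw, string)
  let p2 := if count = 6 then (p1.1 ++ [' '] ++ p1.2, ([] : List Char)) else p1
  let nieuw' := if count = 8 then p2.1 ++ [' '] ++ p2.2 else p2.1
  (nieuw', count, p2.2)

def datum_maken (datum_ : String) : String :=
  String.ofList (datum_.toList.foldl datumStepA ([], 0, [])).1

-- ===== PORT B =====
def datum_maken_alt (datum_ : String) : String :=
  let cs := datum_.toList
  let n := cs.length
  let r := if 4 ≤ n then PySem.List.slice cs (some 0) (some 4) else []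
  let r := if 6 ≤ n then r ++ ' ' :: PySem.List.slice cs (some 4) (some 6) else r
  let r := if 8 ≤ n then r ++ ' ' :: PySem.List.slice cs (some 6) (some 8) else r
  String.ofList r

-- ===== PRECONDITION & SPEC =====
def Spec_datum_maken (datum_ : String) (out : String) : Prop := out = datum_maken_alt datum_
instance (datum_ : String) (out : String) : Decidable (Spec_datum_maken datum_ out) := by unfold Spec_datum_maken; infer_instance

-- ===== CLAIM (what is proved, stated in full; the proofs are below) =====
def Claim_equal_datum_maken : Prop := ∀ (datum_ : String), Dom_datum_maken datum_ → Spec_datum_maken datum_ (datum_maken datum_)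

-- ===== LEMMAS AND PROOFS =====

-- After count reaches 8 no branch of A's loop ever fires again: datum_nieuw is frozen.
theorem foldA_frozen (l : List Char) (nieuw s : List Char) (n : Nat) (h : 8 ≤ n) :
    (l.foldl datumStepA (nieuw, n, s)).1 = nieuw := by
  induction l generalizing s n with
  | nil => rfl
  | cons c t ih =>
    simp only [List.foldl_cons, datumStepA]
    rw [if_neg (by omega), if_neg (by omega), if_neg (by omega)]
    exact ih _ _ (by omega)

theorem datum_maken_eq_alt_list (l : List Char) :
    (l.foldl datumStepA ([], 0, [])).1 =
      (let n := l.length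
       let r := if 4 ≤ n then PySem.List.slice l (some 0) (some 4) else []
       let r := if 6 ≤ n then r ++ ' ' :: PySem.List.slice l (some 4) (some 6) else r
       if 8 ≤ n then r ++ ' ' :: PySem.List.slice l (some 6) (some 8) else r) := by
  have s1 : PySem.List.slice l (some 0) (some 4) = l.take 4 := by simp [pysem]
  have s2 : PySem.List.slice l (some 4) (some 6) = (l.drop 4).take 2 := by simp [pysem]
  have s3 : PySem.List.slice l (some 6) (some 8) = (l.drop 6).take 2 := by simp [pysem]
  simp only [s1, s2, s3]
  match l with
  | [] => rfl
  | [a] => rfl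
  | [a,b] => rfl
  | [a,b,c] => rfl
  | [a,b,c,d] => rfl
  | [a,b,c,d,e] => rfl
  | [a,b,c,d,e,f] => rfl
  | [a,b,c,d,e,f,g] => rfl
  | a::b::c::d::e::f::g::h::rest =>
    simp only [List.foldl_cons]
    rw [show datumStepA (datumStepA (datumStepA (datumStepA (datumStepA (datumStepA (datumStepA
          (datumStepA (([],0,[]) : List Char × Nat × List Char) a) b) c) d) e) f) g) h =
        ([a,b,c,d] ++ ' ' :: [e,f] ++ ' ' :: [g,h], 8, [g,h]) from rfl]
    rw [foldA_frozen rest _ _ 8 (le_refl 8)]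
    have h4 : 4 ≤ (a::b::c::d::e::f::g::h::rest).length := by simp
    have h6 : 6 ≤ (a::b::c::d::e::f::g::h::rest).length := by simp
    have h8 : 8 ≤ (a::b::c::d::e::f::g::h::rest).length := by simp
    simp only [if_pos h4, if_pos h6, if_pos h8, List.take_succ_cons, List.drop_succ_cons,
      List.take_zero]
    rfl

-- ===== VERDICT (by name: the statement is the Claim_ definition above) =====
theorem datum_maken_spec : Claim_equal_datum_maken := by
  intro datum_ _
  unfold Spec_datum_maken datum_maken datum_maken_alt
  rw [datum_maken_eq_alt_list]
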